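-- pv_equiv track=rewrite | github.com/akhiln28/cp | Find local peaks sequel.py | solve
-- ===== SOURCE A (Python) =====
-- def solve(nums):
--     n = len(nums)
--     next_different = [-1] * n
--     before_different = [-1] * n
--     for i in range(n - 2, -1, -1):
--         if nums[i] != nums[i + 1]:
--             next_different[i] = i + 1
--         else:
--             next_different[i] = next_different[i + 1]
--
--     for i in range(1, n, 1):
--         if nums[i] != nums[i - 1]:
--             before_different[i] = i - 1
--         else:
--             before_different[i] = before_different[i - 1]
--     ans: list[int] = []
--     for i in range(n):
--         val = 0
--         if next_different[i] != -1:
--             if nums[next_different[i]] > nums[i]: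
--                 continue
--             else:
--                 val += 1
--         if before_different[i] != -1:
--             if nums[before_different[i]] > nums[i]:
--                 continue
--             else:
--                 val += 1
--         if val:
--             ans.append(i)
--     return ans
-- ===== SOURCE B (Python) =====
-- def solve(nums):
--     n = len(nums)
--
--     def is_peak(i):
--         j = i + 1
--         while j < n and nums[j] == nums[i]:
--             j += 1
--         k = i - 1
--         while k >= 0 and nums[k] == nums[i]:
--             k -= 1
--         if j >= n and k < 0:
--             return False
--         if j < n and nums[j] > nums[i]:
--             return False
--         if k >= 0 and nums[k] > nums[i]:
--             return False
--         return True
--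
--     return [i for i in range(n) if is_peak(i)]
-- ===== Notes on version B (the rewrite author's own statement) =====
-- stated objective: simpler
-- what changed: A precomputes two global next-different/before-different index arrays with DP recurrences and then filters with a counter-and-continue loop; B drops the arrays entirely and decides each index independently with a direct left scan and right scan past its plateau, emitting a comprehension.
import Mathlib
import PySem

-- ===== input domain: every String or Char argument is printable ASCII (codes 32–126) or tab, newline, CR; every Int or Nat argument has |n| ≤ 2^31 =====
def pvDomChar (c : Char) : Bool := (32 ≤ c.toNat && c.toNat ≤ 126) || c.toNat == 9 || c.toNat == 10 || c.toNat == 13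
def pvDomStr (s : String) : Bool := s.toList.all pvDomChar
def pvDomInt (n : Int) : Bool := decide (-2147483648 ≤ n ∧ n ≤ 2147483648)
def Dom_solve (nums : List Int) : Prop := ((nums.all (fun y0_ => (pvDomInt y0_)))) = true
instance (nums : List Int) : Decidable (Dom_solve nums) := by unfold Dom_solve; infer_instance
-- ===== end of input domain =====

-- B replaces A's two DP index arrays by a direct per-index plateau scan (simpler, no precomputation); same return value everywhere.

-- ===== PORT A =====
-- backward loop: next_different[i] = i+1 if nums[i] != nums[i+1] else next_different[i+1]
-- (all indices read/written are in range, so pyGetD/pySetD are exact)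
def ndStep (nums : List Int) (a : List Int) (i : Int) : List Int :=
  PySem.List.pySetD a i
    (if PySem.List.pyGetD nums i 0 ≠ PySem.List.pyGetD nums (i + 1) 0 then i + 1
     else PySem.List.pyGetD a (i + 1) 0)

def buildNd (nums : List Int) : List Int :=
  (PySem.List.pyRange ((nums.length : Int) - 2) (-1) (-1)).foldl (ndStep nums)
    (List.replicate nums.length (-1))

-- forward loop: before_different[i] = i-1 if nums[i] != nums[i-1] else before_different[i-1]
def bdStep (nums : List Int) (a : List Int) (i : Int) : List Int :=
  PySem.List.pySetD a i
    (if PySem.List.pyGetD nums i 0 ≠ PySem.List.pyGetD nums (i - 1) 0 then i - 1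
     else PySem.List.pyGetD a (i - 1) 0)

def buildBd (nums : List Int) : List Int :=
  (PySem.List.pyRange 1 (nums.length : Int) 1).foldl (bdStep nums)
    (List.replicate nums.length (-1))

-- final loop; the two 'continue's become the first two guards, 'val' is the count of surviving sides
def solve (nums : List Int) : List Int :=
  let nd := buildNd nums
  let bd := buildBd nums
  (PySem.List.pyRange 0 (nums.length : Int) 1).foldl (fun ans i =>
    if PySem.List.pyGetD nd i 0 ≠ -1 ∧
        PySem.List.pyGetD nums (PySem.List.pyGetD nd i 0) 0 > PySem.List.pyGetD nums i 0 then ans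
    else if PySem.List.pyGetD bd i 0 ≠ -1 ∧
        PySem.List.pyGetD nums (PySem.List.pyGetD bd i 0) 0 > PySem.List.pyGetD nums i 0 then ans
    else if ((if PySem.List.pyGetD nd i 0 ≠ -1 then (1 : Int) else 0) +
             (if PySem.List.pyGetD bd i 0 ≠ -1 then (1 : Int) else 0)) ≠ 0 then ans ++ [i]
    else ans) []

-- ===== PORT B =====
-- while j < n and nums[j] == nums[i]: j += 1   (returns the final j)
def scanRight (nums : List Int) (v : Int) (j : Nat) : Nat :=
  if h : j < nums.length then
    (if PySem.List.pyGetD nums (j : Int) 0 = v then scanRight nums v (j + 1) else j)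
  else j
termination_by nums.length - j

-- while k >= 0 and nums[k] == nums[i]: k -= 1   (returns the final k; argument m = k + 1)
def scanLeft (nums : List Int) (v : Int) : Nat → Int
  | 0 => -1
  | m + 1 => if PySem.List.pyGetD nums (m : Int) 0 = v then scanLeft nums v m else (m : Int)

def isPeak (nums : List Int) (i : Int) : Bool :=
  let j := scanRight nums (PySem.List.pyGetD nums i 0) (i.toNat + 1)  -- i from range(n) is ≥ 0
  let k := scanLeft nums (PySem.List.pyGetD nums i 0) i.toNat
  if (nums.length : Int) ≤ (j : Int) ∧ k < 0 then false
  else if (j : Int) < (nums.length : Int) ∧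
      PySem.List.pyGetD nums (j : Int) 0 > PySem.List.pyGetD nums i 0 then false
  else if 0 ≤ k ∧ PySem.List.pyGetD nums k 0 > PySem.List.pyGetD nums i 0 then false
  else true

def solve_alt (nums : List Int) : List Int :=
  (PySem.List.pyRange 0 (nums.length : Int) 1).filter (fun i => isPeak nums i)

-- ===== PRECONDITION & SPEC =====
def Spec_solve (nums : List Int) (out : List Int) : Prop := out = solve_alt nums
instance (nums : List Int) (out : List Int) : Decidable (Spec_solve nums out) := by unfold Spec_solve; infer_instance

-- ===== CLAIM (what is proved, stated in full; the proofs are below) =====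
def Claim_equal_solve : Prop := ∀ (nums : List Int), Dom_solve nums → Spec_solve nums (solve nums)

-- ===== LEMMAS AND PROOFS =====

-- spec values of the two arrays, phrased with B's scans
def ndS (nums : List Int) (m : Nat) : Int :=
  if scanRight nums (nums.getD m 0) (m + 1) < nums.length
  then (scanRight nums (nums.getD m 0) (m + 1) : Int) else -1

def bdS (nums : List Int) (m : Nat) : Int := scanLeft nums (nums.getD m 0) m

lemma scanRight_of_ge (nums : List Int) (v : Int) (j : Nat) (h : nums.length ≤ j) :
    scanRight nums v j = j := by
  unfold scanRight; simp [Nat.not_lt.mpr h]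

lemma scanLeft_neg_or_nonneg (nums : List Int) (v : Int) (m : Nat) :
    scanLeft nums v m = -1 ∨ 0 ≤ scanLeft nums v m := by
  induction m with
  | zero => left; rfl
  | succ m ih =>
    unfold scanLeft
    split
    · exact ih
    · right; positivity

lemma ndStep_value (nums : List Int) (a : List Int) (t : Nat)
    (hlen : a.length = nums.length) (ht : t + 1 < nums.length)
    (ha : a[t + 1]? = some (ndS nums (t + 1))) :
    ndStep nums a (t : Int) = a.set t (ndS nums t) := by
  have hget : PySem.List.pyGetD a ((t : Int) + 1) 0 = ndS nums (t + 1) := by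
    have : ((t : Int) + 1) = ((t + 1 : Nat) : Int) := by push_cast; ring
    rw [this, PySem.List.pyGetD_natCast, List.getD_eq_getElem?_getD, ha]; rfl
  have hnum : ∀ (u : Nat), PySem.List.pyGetD nums ((t : Int) + (u : Int)) 0 = nums.getD (t + u) 0 := by
    intro u
    have : ((t : Int) + (u : Int)) = ((t + u : Nat) : Int) := by push_cast; ring
    rw [this, PySem.List.pyGetD_natCast]
  unfold ndStep
  rw [PySem.List.pySetD_natCast]
  congr 1
  have h0 : PySem.List.pyGetD nums (t : Int) 0 = nums.getD t 0 := by
    simpa using hnum 0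
  have h1 : PySem.List.pyGetD nums ((t : Int) + 1) 0 = nums.getD (t + 1) 0 := by
    simpa using hnum 1
  rw [h0, h1, hget]
  by_cases hne : nums.getD t 0 = nums.getD (t + 1) 0
  · -- equal neighbours: scan continues, ndS t = ndS (t+1)
    have hcond : PySem.List.pyGetD nums (((t + 1 : Nat)) : Int) 0 = nums.getD t 0 := by
      rw [PySem.List.pyGetD_natCast]; exact hne.symm
    have hscan : scanRight nums (nums.getD t 0) (t + 1) =
        scanRight nums (nums.getD (t + 1) 0) (t + 2) := by
      conv_lhs => unfold scanRight
      rw [dif_pos ht, if_pos hcond, hne]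
    rw [if_neg (not_not_intro hne)]
    unfold ndS
    rw [hscan]
  · -- different neighbours: scan stops at t+1
    have hcond : ¬ PySem.List.pyGetD nums (((t + 1 : Nat)) : Int) 0 = nums.getD t 0 := by
      rw [PySem.List.pyGetD_natCast]; exact fun h => hne h.symm
    have hscan : scanRight nums (nums.getD t 0) (t + 1) = t + 1 := by
      unfold scanRight
      rw [dif_pos ht, if_neg hcond]
    rw [if_pos hne]
    unfold ndS
    rw [hscan, if_pos ht]
    push_cast; ring

lemma foldl_ndStep_spec (nums : List Int) : ∀ (t : Nat) (a : List Int),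
    a.length = nums.length → t + 1 < nums.length → a[t + 1]? = some (ndS nums (t + 1)) →
    ∀ m, m < nums.length →
      ((PySem.List.pyRange (t : Int) (-1) (-1)).foldl (ndStep nums) a)[m]? =
        if m ≤ t then some (ndS nums m) else a[m]? := by
  intro t
  induction t with
  | zero =>
    intro a hlen ht ha m hm
    simp only [Nat.cast_zero]
    rw [PySem.List.pyRange_neg_one_cons (by norm_num),
      PySem.List.pyRange_neg_one_eq_nil (a := (0 : Int) - 1) (by norm_num)]
    simp only [List.foldl_cons, List.foldl_nil]
    rw [show ((0 : Int)) = ((0 : Nat) : Int) by norm_num, ndStep_value nums a 0 hlen ht ha]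
    rcases Nat.eq_zero_or_pos m with hm0 | hm0
    · subst hm0
      rw [List.getElem?_set_self (by omega), if_pos (le_refl 0)]
    · rw [List.getElem?_set_ne (by omega), if_neg (by omega)]
  | succ t ih =>
    intro a hlen ht ha m hm
    rw [PySem.List.pyRange_neg_one_cons (by push_cast; omega)]
    simp only [List.foldl_cons]
    rw [show (((t + 1 : Nat)) : Int) - 1 = ((t : Nat) : Int) by push_cast; ring,
      ndStep_value nums a (t + 1) hlen ht ha]
    have hset : ∀ v : Int, (a.set (t + 1) v).length = nums.length := by
      intro v; simpa using hlen
    rw [ih (a.set (t + 1) (ndS nums (t + 1))) (hset _) (by omega)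
      (List.getElem?_set_self (by omega)) m hm]
    rcases Nat.lt_trichotomy m (t + 1) with hc | hc | hc
    · rw [if_pos (by omega), if_pos (by omega)]
    · subst hc
      rw [if_neg (by omega), if_pos (le_refl _), List.getElem?_set_self (by omega)]
    · rw [if_neg (by omega), if_neg (by omega), List.getElem?_set_ne (by omega)]

lemma buildNd_spec (nums : List Int) (m : Nat) (hm : m < nums.length) :
    (buildNd nums)[m]? = some (ndS nums m) := by
  have hlast : ∀ u, u + 1 = nums.length → ndS nums u = -1 := by
    intro u hu
    unfold ndS
    rw [scanRight_of_ge nums _ (u + 1) (by omega), if_neg (by omega)]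
  unfold buildNd
  rcases Nat.lt_or_ge nums.length 2 with h2 | h2
  · -- n ≤ 1: empty range, array stays [-1]*n
    rw [PySem.List.pyRange_neg_one_eq_nil (by push_cast; omega)]
    simp only [List.foldl_nil]
    have hm0 : m = 0 := by omega
    have hn1 : nums.length = 1 := by omega
    subst hm0
    rw [List.getElem?_replicate_of_lt (by omega), hlast 0 (by omega)]
  · rw [show ((nums.length : Int) - 2) = (((nums.length - 2 : Nat)) : Int) by push_cast <;> omega]
    rw [foldl_ndStep_spec nums (nums.length - 2) _ (by simp) (by omega)
      (by
        rw [List.getElem?_replicate_of_lt (by omega), hlast (nums.length - 2 + 1) (by omega)])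
      m hm]
    rcases Nat.lt_or_ge m (nums.length - 1) with hc | hc
    · rw [if_pos (by omega)]
    · have hm1 : m = nums.length - 1 := by omega
      subst hm1
      rw [if_neg (by omega), List.getElem?_replicate_of_lt (by omega),
        hlast (nums.length - 1) (by omega)]

lemma bdStep_value (nums : List Int) (a : List Int) (t : Nat)
    (ht0 : 1 ≤ t) (ht : t < nums.length)
    (ha : a[t - 1]? = some (bdS nums (t - 1))) :
    bdStep nums a (t : Int) = a.set t (bdS nums t) := by
  obtain ⟨u, rfl⟩ : ∃ u, t = u + 1 := ⟨t - 1, by omega⟩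
  have hget : PySem.List.pyGetD a (((u + 1 : Nat) : Int) - 1) 0 = bdS nums u := by
    rw [show (((u + 1 : Nat) : Int) - 1) = ((u : Nat) : Int) by push_cast; ring,
      PySem.List.pyGetD_natCast, List.getD_eq_getElem?_getD]
    simp at ha
    rw [ha]; rfl
  unfold bdStep
  rw [PySem.List.pySetD_natCast]
  congr 1
  have h0 : PySem.List.pyGetD nums ((u + 1 : Nat) : Int) 0 = nums.getD (u + 1) 0 :=
    PySem.List.pyGetD_natCast _ _ _
  have h1 : PySem.List.pyGetD nums (((u + 1 : Nat) : Int) - 1) 0 = nums.getD u 0 := by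
    rw [show (((u + 1 : Nat) : Int) - 1) = ((u : Nat) : Int) by push_cast; ring,
      PySem.List.pyGetD_natCast]
  rw [h0, h1, hget]
  have hunf : scanLeft nums (nums.getD (u + 1) 0) (u + 1) =
      if PySem.List.pyGetD nums ((u : Nat) : Int) 0 = nums.getD (u + 1) 0
      then scanLeft nums (nums.getD (u + 1) 0) u else ((u : Nat) : Int) := rfl
  by_cases hne : nums.getD (u + 1) 0 = nums.getD u 0
  · -- equal neighbours: bdS (u+1) = bdS u
    rw [if_neg (not_not_intro hne)]
    unfold bdS
    rw [hunf, if_pos (by rw [PySem.List.pyGetD_natCast]; exact hne.symm), hne]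
  · rw [if_pos hne]
    unfold bdS
    rw [hunf, if_neg (by rw [PySem.List.pyGetD_natCast]; exact fun h => hne h.symm)]
    push_cast; ring

lemma foldl_bdStep_spec (nums : List Int) : ∀ (c : Nat) (t : Nat) (a : List Int),
    t + c = nums.length → 1 ≤ t → a.length = nums.length →
    a[t - 1]? = some (bdS nums (t - 1)) →
    ∀ m, m < nums.length →
      ((PySem.List.pyRange (t : Int) (nums.length : Int) 1).foldl (bdStep nums) a)[m]? =
        if t ≤ m then some (bdS nums m) else a[m]? := by
  intro c
  induction c with
  | zero =>
    intro t a hc ht1 hlen ha m hm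
    rw [PySem.List.pyRange_one_eq_nil (by omega)]
    simp only [List.foldl_nil]
    rw [if_neg (by omega)]
  | succ c ih =>
    intro t a hc ht1 hlen ha m hm
    rw [PySem.List.pyRange_one_cons (by exact_mod_cast (by omega : t < nums.length))]
    simp only [List.foldl_cons]
    rw [bdStep_value nums a t ht1 (by omega) ha]
    have hset : (a.set t (bdS nums t)).length = nums.length := by simpa using hlen
    rw [show ((t : Nat) : Int) + 1 = (((t + 1 : Nat)) : Int) by push_cast; ring]
    rw [ih (t + 1) (a.set t (bdS nums t)) (by omega) (by omega) hset
      (by simpa using List.getElem?_set_self (l := a) (a := bdS nums t) (by omega)) m hm]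
    rcases Nat.lt_trichotomy m t with hcmp | hcmp | hcmp
    · rw [if_neg (by omega), if_neg (by omega), List.getElem?_set_ne (by omega)]
    · subst hcmp
      rw [if_neg (by omega), if_pos (le_refl _), List.getElem?_set_self (by omega)]
    · rw [if_pos (by omega), if_pos (by omega)]

lemma buildBd_spec (nums : List Int) (m : Nat) (hm : m < nums.length) :
    (buildBd nums)[m]? = some (bdS nums m) := by
  have h0 : bdS nums 0 = -1 := rfl
  unfold buildBd
  have hn1 : 1 ≤ nums.length := by omega
  have h := foldl_bdStep_spec nums (nums.length - 1) 1 (List.replicate nums.length (-1))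
    (by omega) (le_refl _) (by simp)
    (by rw [List.getElem?_replicate_of_lt (by omega)]; simp [h0]) m hm
  push_cast at h
  rw [h]
  rcases Nat.eq_zero_or_pos m with hm0 | hm0
  · subst hm0
    rw [if_neg (by omega), List.getElem?_replicate_of_lt (by omega), h0]
  · rw [if_pos (by omega)]

lemma cond_core (nums : List Int) (v : Int) (j : Nat) (k : Int) (hk : k = -1 ∨ 0 ≤ k) :
    (decide (¬ ((if j < nums.length then (j : Int) else -1) ≠ -1 ∧
        PySem.List.pyGetD nums (if j < nums.length then (j : Int) else -1) 0 > v) ∧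
      ¬ (k ≠ -1 ∧ PySem.List.pyGetD nums k 0 > v) ∧
      ((if (if j < nums.length then (j : Int) else -1) ≠ -1 then (1 : Int) else 0) +
       (if k ≠ -1 then (1 : Int) else 0)) ≠ 0)) =
    (if (nums.length : Int) ≤ (j : Int) ∧ k < 0 then false
     else if (j : Int) < (nums.length : Int) ∧
        PySem.List.pyGetD nums ((j : Nat) : Int) 0 > v then false
     else if 0 ≤ k ∧ PySem.List.pyGetD nums k 0 > v then false else true) := by
  have hjne : ((j : Int)) ≠ -1 := by omega
  rcases hk with rfl | hk
  · by_cases hj : j < nums.length <;>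
      by_cases hc : PySem.List.pyGetD nums ((j : Nat) : Int) 0 > v <;>
      simp_all [Nat.cast_le, Nat.cast_lt, Int.not_le, Int.not_lt, Nat.not_le, Nat.not_lt,
        ← decide_not]
  · have hkne : k ≠ -1 := by omega
    have hknn : ¬ k < 0 := by omega
    by_cases hj : j < nums.length <;>
      by_cases hc : PySem.List.pyGetD nums ((j : Nat) : Int) 0 > v <;>
      by_cases hc2 : PySem.List.pyGetD nums k 0 > v <;>
      simp_all [Nat.cast_le, Nat.cast_lt, Int.not_le, Int.not_lt, Nat.not_le, Nat.not_lt,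
        ← decide_not]

lemma cond_eq (nums : List Int) (i : Int) (h0 : 0 ≤ i) (hn : i < (nums.length : Int)) :
    (decide (¬ (PySem.List.pyGetD (buildNd nums) i 0 ≠ -1 ∧
        PySem.List.pyGetD nums (PySem.List.pyGetD (buildNd nums) i 0) 0 >
          PySem.List.pyGetD nums i 0) ∧
      ¬ (PySem.List.pyGetD (buildBd nums) i 0 ≠ -1 ∧
        PySem.List.pyGetD nums (PySem.List.pyGetD (buildBd nums) i 0) 0 >
          PySem.List.pyGetD nums i 0) ∧
      ((if PySem.List.pyGetD (buildNd nums) i 0 ≠ -1 then (1 : Int) else 0) +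
       (if PySem.List.pyGetD (buildBd nums) i 0 ≠ -1 then (1 : Int) else 0)) ≠ 0)) =
    isPeak nums i := by
  obtain ⟨m, rfl⟩ := Int.eq_ofNat_of_zero_le h0
  have hm : m < nums.length := by exact_mod_cast hn
  have hnd : PySem.List.pyGetD (buildNd nums) ((m : Nat) : Int) 0 = ndS nums m := by
    rw [PySem.List.pyGetD_natCast, List.getD_eq_getElem?_getD, buildNd_spec nums m hm]; rfl
  have hbd : PySem.List.pyGetD (buildBd nums) ((m : Nat) : Int) 0 = bdS nums m := by
    rw [PySem.List.pyGetD_natCast, List.getD_eq_getElem?_getD, buildBd_spec nums m hm]; rfl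
  have hnum : PySem.List.pyGetD nums ((m : Nat) : Int) 0 = nums.getD m 0 :=
    PySem.List.pyGetD_natCast _ _ _
  rw [hnd, hbd, hnum]
  unfold isPeak
  rw [hnum]
  simp only [Int.toNat_natCast]
  unfold ndS bdS
  exact cond_core nums (nums.getD m 0) (scanRight nums (nums.getD m 0) (m + 1))
    (scanLeft nums (nums.getD m 0) m) (scanLeft_neg_or_nonneg nums (nums.getD m 0) m)

lemma if3_eq {α : Type} (c1 c2 c3 : Prop) [Decidable c1] [Decidable c2] [Decidable c3]
    (ans : List α) (i : α) :
    (if c1 then ans else if c2 then ans else if c3 then ans ++ [i] else ans) =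
      (if ¬ c1 ∧ ¬ c2 ∧ c3 then ans ++ [i] else ans) := by
  split_ifs <;> tauto

-- ===== VERDICT (by name: the statement is the Claim_ definition above) =====
theorem solve_spec : Claim_equal_solve := by
  intro nums _
  unfold Spec_solve
  simp only [solve, solve_alt]
  have hbody : (fun (ans : List Int) (i : Int) =>
      if PySem.List.pyGetD (buildNd nums) i 0 ≠ -1 ∧
          PySem.List.pyGetD nums (PySem.List.pyGetD (buildNd nums) i 0) 0 >
            PySem.List.pyGetD nums i 0 then ans
      else if PySem.List.pyGetD (buildBd nums) i 0 ≠ -1 ∧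
          PySem.List.pyGetD nums (PySem.List.pyGetD (buildBd nums) i 0) 0 >
            PySem.List.pyGetD nums i 0 then ans
      else if ((if PySem.List.pyGetD (buildNd nums) i 0 ≠ -1 then (1 : Int) else 0) +
               (if PySem.List.pyGetD (buildBd nums) i 0 ≠ -1 then (1 : Int) else 0)) ≠ 0 then
        ans ++ [i]
      else ans) =
      (fun (ans : List Int) (i : Int) =>
        if (¬ (PySem.List.pyGetD (buildNd nums) i 0 ≠ -1 ∧
              PySem.List.pyGetD nums (PySem.List.pyGetD (buildNd nums) i 0) 0 >
                PySem.List.pyGetD nums i 0) ∧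
            ¬ (PySem.List.pyGetD (buildBd nums) i 0 ≠ -1 ∧
              PySem.List.pyGetD nums (PySem.List.pyGetD (buildBd nums) i 0) 0 >
                PySem.List.pyGetD nums i 0) ∧
            ((if PySem.List.pyGetD (buildNd nums) i 0 ≠ -1 then (1 : Int) else 0) +
             (if PySem.List.pyGetD (buildBd nums) i 0 ≠ -1 then (1 : Int) else 0)) ≠ 0) then
          ans ++ [i]
        else ans) := by
    funext ans i
    exact if3_eq _ _ _ ans i
  rw [hbody, PySem.List.foldl_append_ite_eq_filter, List.nil_append]
  refine List.filter_congr ?_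
  intro i hi
  rw [PySem.List.mem_pyRange_one] at hi
  exact cond_eq nums i hi.1 hi.2
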